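-- pv_equiv track=rewrite | github.com/asheuh/pyalgorithms | adventofcode/2023/day13.py | solve
-- ===== SOURCE A (Python) =====
-- from itertools import starmap
--
-- def solve(blocks, smudge=0):
--     total = 0
--
--     for block in blocks:
--         def find_mirror(b, mul):
--             count = 0
--             for i in range(1, len(b)):
--                 up, down = "".join(b[:i][::-1]), "".join(b[i:])
--                 if smudge == sum(starmap(lambda a, b: a != b, zip(up, down))):
--                     count = i
--
--             if not count:
--                 return find_mirror(transpose_matrix(b), 1)
--             return count * mul
--
--         count = find_mirror(block, 100)
--         total += count
--     return total
--
-- def transpose_matrix(block):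
--     return tuple("".join(c[::-1]) for c in zip(*block))
-- ===== SOURCE B (Python) =====
-- def solve(blocks, smudge=0):
--     return sum(_score(block, smudge) for block in blocks)
--
--
-- def _best(dist, n, smudge):
--     # largest split i in 1..n-1 whose mirrored pairs sum to exactly `smudge`
--     # mismatches, read off the precomputed distance table; scanned from the
--     # top with an early return, 0 if none
--     for i in range(n - 1, 0, -1):
--         if sum(dist[i - 1 - d][i + d] for d in range(min(i, n - i))) == smudge:
--             return i
--     return 0
--
--
-- def _score(block, smudge):
--     n = len(block)
--     # pairwise row-distance table, built once; the split scan never touches a character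
--     rd = [[sum(a != b for a, b in zip(block[j], block[k])) for k in range(n)]
--           for j in range(n)]
--     r = _best(rd, n, smudge)
--     if r:
--         return 100 * r
--     # pairwise column-distance table, read straight off the rows (no transpose)
--     w = min((len(row) for row in block), default=0)
--     cd = [[sum(row[c1] != row[c2] for row in block) for c2 in range(w)]
--           for c1 in range(w)]
--     c = _best(cd, w, smudge)
--     if c:
--         return c
--     raise ValueError("block has no reflection line")
-- ===== Notes on version B (the rewrite author's own statement) =====
-- stated objective: alternative
-- what changed: A joins strings and recounts character mismatches for every candidate split, recursing on a reversed-column transpose; B precomputes a pairwise row-distance table (and, if needed, a pairwise column-distance table read straight off the rows, no transpose), then picks the split by a descending early-return scan that only sums table entries and never touches a character.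
-- outside the precondition, e.g. on solve([['ab', 'a', 'ab']], 0): A returns 2, B returns 200; on solve([['.', '.', '..', '###', '#.#']], 0): A returns 200, B returns 100; on solve([['.#']], 0): A raises RecursionError, B raises ValueError
import Mathlib
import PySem

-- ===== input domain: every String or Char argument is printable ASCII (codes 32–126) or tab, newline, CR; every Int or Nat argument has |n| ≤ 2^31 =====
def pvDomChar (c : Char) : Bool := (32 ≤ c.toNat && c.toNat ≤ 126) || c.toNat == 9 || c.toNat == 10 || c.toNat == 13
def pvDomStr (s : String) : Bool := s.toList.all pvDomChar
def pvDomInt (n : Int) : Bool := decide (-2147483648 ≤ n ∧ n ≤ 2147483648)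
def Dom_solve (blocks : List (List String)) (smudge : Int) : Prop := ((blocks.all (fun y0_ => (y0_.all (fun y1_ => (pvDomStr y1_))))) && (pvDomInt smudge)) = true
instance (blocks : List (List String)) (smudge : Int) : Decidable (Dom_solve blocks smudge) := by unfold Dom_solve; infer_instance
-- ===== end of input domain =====

-- B replaces A's per-split string joining / character recounting and its recursion on a
-- reversed-column transpose by precomputed pairwise distance tables (rows once; columns read
-- straight off the rows, no transpose) scanned by a descending early-return split search that
-- only sums table entries (objective: alternative); on a block with no row/column reflection
-- B raises ValueError where A never returns either (excluded by Pre_solve).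

-- ===== PORT A =====

-- count = 0; for i in range(1, len(b)): if smudge == sum(a != b for a, b in zip("".join(b[:i][::-1]), "".join(b[i:]))): count = i
-- (range(1, len(b)) ported as List.range' 1 (len-1); "".join = flatten on the List Char side)
def countA (smudge : Int) (b : List (List Char)) : Int :=
  (List.range' 1 (b.length - 1)).foldl
    (fun count i =>
      if smudge = (((((b.take i).reverse).flatten).zip ((b.drop i).flatten)).countP
          (fun q => decide (q.1 ≠ q.2)) : Nat)
      then (i : Int) else count) 0

-- zip(*block): n-ary zip, truncating at the first exhausted row (zip() = [] on no rows);
-- the structural Nat fuel only bounds the recursion depth (it is at least min-width + 1,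
-- so it is never exhausted)
def zipStarGo (fuel : Nat) (b : List (List Char)) : List (List Char) :=
  match fuel with
  | 0 => []
  | f + 1 =>
    if b.isEmpty || b.any (fun r => r.isEmpty) then []
    else (b.map (fun r => r.headD ' ')) :: zipStarGo f (b.map List.tail)

def zipStar (b : List (List Char)) : List (List Char) :=
  zipStarGo ((b.headD []).length + 1) b

-- transpose_matrix(block) = tuple("".join(c[::-1]) for c in zip(*block))
def transposeMatA (b : List (List Char)) : List (List Char) :=
  (zipStar b).map List.reverse

-- find_mirror(b, mul), closing over smudge; the Nat fuel only makes the recursion total: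
-- under Pre_solve the recursion stops at depth ≤ 1, so the fuel-0 branch is unreachable there
def findMirrorA (smudge : Int) (fuel : Nat) (b : List (List Char)) (mul : Int) : Int :=
  let count := countA smudge b
  if count = 0 then
    match fuel with
    | 0 => 0
    | f + 1 => findMirrorA smudge f (transposeMatA b) 1
  else count * mul

def solve (blocks : List (List String)) (smudge : Int) : Int :=
  blocks.foldl (fun total block => total + findMirrorA smudge 3 (block.map String.toList) 100) 0

-- ===== PORT B =====

-- sum(a != b for a, b in zip(block[j], block[k])): pairwise distance of two rows (strings)
def distS (a b : String) : Int :=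
  (((a.toList.zip b.toList).countP (fun q => decide (q.1 ≠ q.2))) : Nat)

-- _best(dist, n, smudge): 'for i in range(n-1, 0, -1): if sum(dist[i-1-d][i+d] for d in
-- range(min(i, n-i))) == smudge: return i' ported as the obvious descending recursion on i
def bestGoB (dist : List (List Int)) (n : Nat) (smudge : Int) : Nat → Int
  | 0 => 0
  | i + 1 =>
    if (((List.range (min (i + 1) (n - (i + 1)))).map
          (fun d => (dist.getD (i - d) []).getD (i + 1 + d) 0)).sum) = smudge
    then ((i + 1 : Nat) : Int)
    else bestGoB dist n smudge i

-- rd = [[sum(a != b for a, b in zip(block[j], block[k])) for k in range(n)] for j in range(n)]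
def rdB (block : List String) : List (List Int) :=
  (List.range block.length).map (fun j => (List.range block.length).map
    (fun k => distS (block.getD j "") (block.getD k "")))

-- w = min((len(row) for row in block), default=0)
def wB (block : List String) : Nat :=
  if block.isEmpty then 0 else ((block.map (fun s => s.toList.length)).min?).getD 0

-- cd = [[sum(row[c1] != row[c2] for row in block) for c2 in range(w)] for c1 in range(w)]
-- (row[c] is exact via getD since c < w ≤ len(row))
def cdB (block : List String) : List (List Int) :=
  (List.range (wB block)).map (fun c1 => (List.range (wB block)).map (fun c2 =>
    ((block.countP (fun row => decide (row.toList.getD c1 ' ' ≠ row.toList.getD c2 ' ')) : Nat) : Int)))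

-- _score(block, smudge); where Python B raises ValueError (both tables yielded no split) the
-- port returns 0 — those inputs are excluded by Pre_solve
def scoreB (block : List String) (smudge : Int) : Int :=
  let r := bestGoB (rdB block) block.length smudge (block.length - 1)
  if r ≠ 0 then 100 * r
  else
    let c := bestGoB (cdB block) (wB block) smudge (wB block - 1)
    if c ≠ 0 then c else 0

def solve_alt (blocks : List (List String)) (smudge : Int) : Int :=
  blocks.foldl (fun total block => total + scoreB block smudge) 0

-- ===== PRECONDITION & SPEC =====

-- some reflection line i has exactly `smudge` mismatched characters between the character
-- stream above it (nearest row first) and the stream below it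
abbrev pvHasMirror (lines : List (List Char)) (smudge : Int) : Prop :=
  ∃ i ∈ List.range' 1 (lines.length - 1),
    (List.zipWith (fun a b => if a = b then (0 : Int) else 1)
      (lines.take i).reverse.flatten (lines.drop i).flatten).sum = smudge

-- column c of the block, for every c below the common width (the minimum row length)
def pvColumns (g : List (List Char)) : List (List Char) :=
  (List.range ((g.map List.length).foldr Nat.min (g.headD []).length)).map
    (fun c => g.filterMap (fun row => row[c]?))

-- Pre_solve: every block is rectangular (all rows one length) or tiny (≤ 2 rows, where row
-- alignment is trivial), and has a reflection line with exactly `smudge` mismatches over its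
-- rows or over its columns.  Excluded: blocks with no reflection line anywhere, on which A
-- recurses forever (RecursionError) and B raises ValueError; and ragged blocks of ≥ 3 rows,
-- on which A's concatenated-stream zip truncation misaligns rows — an accident of the
-- implementation on inputs outside the puzzle's rectangular-grid domain.
def Pre_solve (blocks : List (List String)) (smudge : Int) : Prop :=
  ∀ block ∈ blocks,
    ((∀ r ∈ block, r.toList.length = (block.headD "").toList.length) ∨ block.length ≤ 2) ∧
    (pvHasMirror (block.map (·.toList)) smudge ∨
      pvHasMirror (pvColumns (block.map (·.toList))) smudge)

instance (blocks : List (List String)) (smudge : Int) : Decidable (Pre_solve blocks smudge) := by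
  unfold Pre_solve; infer_instance

def pvWitness_solve : List (List String) × Int := ([[".#", ".#"]], 0)

def Spec_solve (blocks : List (List String)) (smudge : Int) (out : Int) : Prop := out = solve_alt blocks smudge
instance (blocks : List (List String)) (smudge : Int) (out : Int) : Decidable (Spec_solve blocks smudge out) := by unfold Spec_solve; infer_instance

-- ===== CLAIM (what is proved, stated in full; the proofs are below) =====
def Claim_equal_solve : Prop := ∀ (blocks : List (List String)) (smudge : Int), Dom_solve blocks smudge → Pre_solve blocks smudge → Spec_solve blocks smudge (solve blocks smudge)

-- ===== LEMMAS AND PROOFS =====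

-- proof-side: last-match fold (A's scan shape) over a generic split predicate
def mismB (upRows downRows : List (List Char)) : Int :=
  (((upRows.reverse.flatten).zip (downRows.flatten)).countP (fun q => decide (q.1 ≠ q.2)) : Nat)

def splitB (smudge : Int) (lines : List (List Char)) : Int :=
  (List.range' 1 (lines.length - 1)).foldl
    (fun best i => if mismB (lines.take i) (lines.drop i) = smudge then (i : Int) else best) 0

def pvW (b : List (List Char)) : Nat :=
  if b.isEmpty then 0 else ((b.map List.length).min?).getD 0

def colsB (block : List (List Char)) : List (List Char) :=
  (List.range (pvW block)).map (fun c => block.map (fun row => row.getD c ' '))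

-- ===== old A-side machinery (stream counting, transpose characterisation) =====

lemma flat_countP (w : Nat) :
    ∀ (us ds : List (List Char)), (∀ r ∈ us, r.length = w) → (∀ r ∈ ds, r.length = w) →
      ((us.flatten).zip (ds.flatten)).countP (fun q => decide (q.1 ≠ q.2))
        = ((us.zip ds).map (fun p => (p.1.zip p.2).countP (fun q => decide (q.1 ≠ q.2)))).sum
  | [], _, _, _ => by simp
  | _ :: _, [], _, _ => by simp
  | u :: us, d :: ds, hu, hd => by
    simp only [List.flatten_cons, List.zip_cons_cons, List.map_cons, List.sum_cons]
    rw [List.zip_append (by rw [hu u (by simp), hd d (by simp)]), List.countP_append,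
      flat_countP w us ds (fun r hr => hu r (List.mem_cons_of_mem _ hr))
        (fun r hr => hd r (List.mem_cons_of_mem _ hr))]

lemma countP_zip_reverse :
    ∀ (u d : List Char), u.length = d.length →
      (u.reverse.zip d.reverse).countP (fun q => decide (q.1 ≠ q.2))
        = (u.zip d).countP (fun q => decide (q.1 ≠ q.2))
  | [], [], _ => rfl
  | [], _ :: _, h => by simp at h
  | _ :: _, [], h => by simp at h
  | a :: u, b :: d, h => by
    have h' : u.length = d.length := by simpa using h
    simp only [List.reverse_cons]
    rw [List.zip_append (by simp [h']), List.countP_append,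
      countP_zip_reverse u d h']
    simp [List.countP_cons]

lemma getD_succ_tail (row : List Char) (c : Nat) :
    row.getD (c + 1) ' ' = row.tail.getD c ' ' := by
  cases row <;> simp

lemma pvW_tails (b : List (List Char)) (hne : b ≠ []) (hrows : ∀ r ∈ b, r ≠ []) :
    pvW (b.map List.tail) = pvW b - 1 ∧ 1 ≤ pvW b := by
  obtain ⟨m, hm, hmem, hlb⟩ : ∃ m, (b.map List.length).min? = some m ∧
      m ∈ b.map List.length ∧ ∀ x ∈ b.map List.length, m ≤ x := by
    cases hm : (b.map List.length).min? with
    | none =>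
      rw [List.min?_eq_none_iff] at hm
      exact absurd (List.map_eq_nil_iff.mp hm) hne
    | some m =>
      obtain ⟨h1, h2⟩ := List.min?_eq_some_iff.mp hm
      exact ⟨m, rfl, h1, h2⟩
  have hm1 : 1 ≤ m := by
    obtain ⟨r, hr, hrl⟩ := List.mem_map.mp hmem
    have hne' : r.length ≠ 0 := by
      simpa [List.length_eq_zero_iff] using hrows r hr
    omega
  have hW : pvW b = m := by
    unfold pvW
    simp [List.isEmpty_iff, hne, hm]
  have hmt : ((b.map List.tail).map List.length).min? = some (m - 1) := by
    rw [List.min?_eq_some_iff]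
    constructor
    · obtain ⟨r, hr, hrl⟩ := List.mem_map.mp hmem
      exact List.mem_map.mpr ⟨r.tail, List.mem_map.mpr ⟨r, hr, rfl⟩,
        by simp [List.length_tail, hrl]⟩
    · intro y hy
      obtain ⟨t, ht, rfl⟩ := List.mem_map.mp hy
      obtain ⟨r, hr, rfl⟩ := List.mem_map.mp ht
      have := hlb r.length (List.mem_map.mpr ⟨r, hr, rfl⟩)
      simp only [List.length_tail]
      omega
  have hWt : pvW (b.map List.tail) = m - 1 := by
    have hne2 : (b.map List.tail).isEmpty = false := by
      rw [List.isEmpty_eq_false_iff]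
      simpa using hne
    unfold pvW
    rw [hne2]
    simp only [Bool.false_eq_true, if_false]
    rw [hmt]
    rfl
  exact ⟨by omega, by omega⟩

lemma pvW_zero_of_guard (b : List (List Char))
    (h : (b.isEmpty || b.any (fun r => r.isEmpty)) = true) : pvW b = 0 := by
  by_cases hb : b = []
  · subst hb; rfl
  · have hany : ∃ r ∈ b, r = [] := by
      rcases (by simpa using h :
          b.isEmpty = true ∨ (b.any fun r => r.isEmpty) = true) with h1 | h1
      · exact absurd (List.isEmpty_iff.mp h1) hb
      · obtain ⟨r, hr, hre⟩ := List.any_eq_true.mp h1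
        exact ⟨r, hr, List.isEmpty_iff.mp hre⟩
    obtain ⟨r, hr, rfl⟩ := hany
    have hmin : (b.map List.length).min? = some 0 := by
      rw [List.min?_eq_some_iff]
      exact ⟨List.mem_map.mpr ⟨[], hr, rfl⟩, fun y _ => Nat.zero_le y⟩
    unfold pvW
    simp [List.isEmpty_iff, hb, hmin]

lemma zipStarGo_eq : ∀ (n : Nat) (b : List (List Char)), (b.headD []).length < n →
    zipStarGo n b = (List.range (pvW b)).map (fun c => b.map (fun row => row.getD c ' ')) := by
  intro n
  induction n with
  | zero => intro b hb; omega
  | succ n ih =>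
    intro b hb
    by_cases h : (b.isEmpty || b.any (fun r => r.isEmpty)) = true
    · rw [zipStarGo, if_pos h, pvW_zero_of_guard b h]; simp
    · have hfacts : b ≠ [] ∧ ∀ r ∈ b, r ≠ [] := by
        constructor
        · intro h0; subst h0; simp at h
        · intro r hr h0
          apply h
          have : (b.any fun r => r.isEmpty) = true := List.any_eq_true.mpr ⟨r, hr, by simp [h0]⟩
          simp [this]
      obtain ⟨hne, hrows⟩ := hfacts
      rw [zipStarGo, if_neg (by simp [h])]
      have hW := pvW_tails b hne hrows
      have htl : ((b.map List.tail).headD []).length < n := by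
        cases b with
        | nil => exact absurd rfl hne
        | cons hd tl =>
          have hhd : hd ≠ [] := hrows hd (by simp)
          have : hd.length ≠ 0 := by simpa [List.length_eq_zero_iff] using hhd
          simp only [List.map_cons, List.headD_cons, List.length_tail]
          simp only [List.headD_cons] at hb
          omega
      rw [ih (b.map List.tail) htl, hW.1]
      set k := pvW b - 1 with hk
      have hWk : pvW b = k + 1 := by omega
      rw [hWk, List.range_succ_eq_map, List.map_cons]
      congr 1
      · exact List.map_congr_left fun r _ => by cases r <;> simp
      · rw [List.map_map]
        apply List.map_congr_left
        intro c _
        simp only [Function.comp_apply]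
        rw [List.map_map]
        exact List.map_congr_left fun r _ => (getD_succ_tail r c).symm

lemma zipStar_eq (b : List (List Char)) :
    zipStar b = (List.range (pvW b)).map (fun c => b.map (fun row => row.getD c ' ')) :=
  zipStarGo_eq ((b.headD []).length + 1) b (by omega)

lemma filterMap_getElem_eq (c : Nat) :
    ∀ (rows : List (List Char)), (∀ r ∈ rows, c < r.length) →
      rows.filterMap (fun row => row[c]?) = rows.map (fun row => row.getD c ' ')
  | [], _ => rfl
  | r :: rs, hlen => by
    rw [List.filterMap_cons, List.map_cons,
      List.getElem?_eq_getElem (hlen r (by simp)),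
      List.getD_eq_getElem r ' ' (hlen r (by simp)),
      filterMap_getElem_eq c rs (fun r hr => hlen r (List.mem_cons_of_mem _ hr))]

lemma pvWidth_eq_pvW (rows : List (List Char)) :
    (rows.map List.length).foldr Nat.min (rows.headD []).length = pvW rows := by
  cases rows with
  | nil => rfl
  | cons r rs =>
    unfold pvW
    rw [List.map_cons, List.min?_cons']
    simp only [List.headD_cons, ← List.foldl_eq_foldr,
      List.isEmpty_cons, Bool.false_eq_true, if_false, Option.getD_some]
    show List.foldl Nat.min r.length (r.length :: List.map List.length rs)
        = List.foldl Nat.min r.length (List.map List.length rs)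
    rw [List.foldl_cons]
    congr 1
    exact Nat.min_self r.length

lemma pvW_le (rows : List (List Char)) : ∀ r ∈ rows, pvW rows ≤ r.length := by
  intro r hr
  have hne : rows ≠ [] := List.ne_nil_of_mem hr
  cases hm : (rows.map List.length).min? with
  | none =>
    rw [List.min?_eq_none_iff] at hm
    exact absurd (List.map_eq_nil_iff.mp hm) hne
  | some m =>
    have hlb := (List.min?_eq_some_iff.mp hm).2
    have : m ≤ r.length := hlb r.length (List.mem_map.mpr ⟨r, hr, rfl⟩)
    unfold pvW
    simp [List.isEmpty_iff, hne, hm]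
    omega

lemma colsB_eq_pvColumns (rows : List (List Char)) : colsB rows = pvColumns rows := by
  unfold colsB pvColumns
  rw [pvWidth_eq_pvW]
  apply List.map_congr_left
  intro c hc
  have hc' : c < pvW rows := List.mem_range.mp hc
  have hlen : ∀ r ∈ rows, c < r.length := fun r hr => lt_of_lt_of_le hc' (pvW_le rows r hr)
  exact (filterMap_getElem_eq c rows hlen).symm

lemma pick_ne_zero (P : Nat → Prop) [DecidablePred P] (l : List Nat) (h0 : ∀ i ∈ l, 0 < i) :
    (l.foldl (fun acc i => if P i then (i : Int) else acc) 0 ≠ 0) ↔ ∃ i ∈ l, P i := by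
  induction l using List.reverseRecOn with
  | nil => simp
  | append_singleton l x ih =>
    rw [List.foldl_append]
    simp only [List.foldl_cons, List.foldl_nil]
    by_cases hp : P x
    · have hx : (0 : Int) < x := by exact_mod_cast h0 x (by simp)
      simp only [if_pos hp]
      constructor
      · intro _; exact ⟨x, by simp, hp⟩
      · intro _; omega
    · simp only [if_neg hp]
      rw [ih (fun i hi => h0 i (by simp [hi]))]
      constructor
      · rintro ⟨i, hi, hPi⟩; exact ⟨i, by simp [hi], hPi⟩
      · rintro ⟨i, hi, hPi⟩
        rcases (List.mem_append.mp hi) with h | h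
        · exact ⟨i, h, hPi⟩
        · simp only [List.mem_singleton] at h; subst h; exact absurd hPi hp

lemma zipWith_sum_eq :
    ∀ (u d : List Char),
      (List.zipWith (fun a b => if a = b then (0 : Int) else 1) u d).sum
        = ((u.zip d).countP (fun q => decide (q.1 ≠ q.2)) : Nat)
  | [], _ => by simp
  | _ :: _, [] => by simp
  | a :: u, b :: d => by
    rw [List.zipWith_cons_cons, List.sum_cons, List.zip_cons_cons, List.countP_cons,
      zipWith_sum_eq u d]
    by_cases h : a = b
    · simp [h]
    · simp [h]
      omega

lemma mismB_pvMism (lines : List (List Char)) (i : Nat) :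
    mismB (lines.take i) (lines.drop i)
      = (List.zipWith (fun a b => if a = b then (0 : Int) else 1)
          (lines.take i).reverse.flatten (lines.drop i).flatten).sum := by
  unfold mismB
  rw [zipWith_sum_eq]

lemma splitB_ne_zero_iff (smudge : Int) (lines : List (List Char)) :
    splitB smudge lines ≠ 0 ↔ pvHasMirror lines smudge := by
  unfold splitB
  rw [pick_ne_zero (fun i => mismB (lines.take i) (lines.drop i) = smudge) _
    (fun i hi => (List.mem_range'_1.mp hi).1)]
  constructor
  · rintro ⟨i, hi, h⟩; exact ⟨i, hi, by rw [← mismB_pvMism]; exact h⟩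
  · rintro ⟨i, hi, h⟩; exact ⟨i, hi, by rw [mismB_pvMism]; exact h⟩

lemma countA_eq_splitB (smudge : Int) (lines : List (List Char)) :
    countA smudge lines = splitB smudge lines := by
  unfold countA splitB
  apply PySem.List.foldl_congr_mem
  intro acc i _
  exact if_congr eq_comm rfl rfl

lemma countA_transpose (smudge : Int) (b : List (List Char)) :
    countA smudge (transposeMatA b) = splitB smudge (colsB b) := by
  set C := (List.range (pvW b)).map (fun c => b.map (fun row => row.getD c ' ')) with hC
  have hT : transposeMatA b = C.map List.reverse := by
    unfold transposeMatA; rw [zipStar_eq]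
  have hcols : colsB b = C := rfl
  have hlenC : ∀ c ∈ C, c.length = b.length := by
    intro c hc
    obtain ⟨i, _, rfl⟩ := List.mem_map.mp hc
    simp
  rw [hT, hcols]
  unfold countA splitB
  rw [List.length_map]
  apply PySem.List.foldl_congr_mem
  intro acc i _
  have hus : ∀ r ∈ ((C.map List.reverse).take i).reverse, r.length = b.length := by
    intro r hr
    obtain ⟨c, hc, rfl⟩ := List.mem_map.mp (List.mem_of_mem_take (List.mem_reverse.mp hr))
    simp [hlenC c hc]
  have hds : ∀ r ∈ (C.map List.reverse).drop i, r.length = b.length := by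
    intro r hr
    obtain ⟨c, hc, rfl⟩ := List.mem_map.mp (List.mem_of_mem_drop hr)
    simp [hlenC c hc]
  rw [flat_countP b.length _ _ hus hds]
  have hzip : ((C.map List.reverse).take i).reverse.zip ((C.map List.reverse).drop i)
      = ((C.take i).reverse.zip (C.drop i)).map
          (Prod.map List.reverse List.reverse) := by
    rw [← List.map_take, ← List.map_reverse, ← List.map_drop, List.zip_map]
  rw [hzip, List.map_map]
  have hsum : (((C.take i).reverse.zip (C.drop i)).map
        ((fun p : List Char × List Char => (p.1.zip p.2).countP (fun q => decide (q.1 ≠ q.2)))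
          ∘ Prod.map List.reverse List.reverse))
      = ((C.take i).reverse.zip (C.drop i)).map
          (fun p => (p.1.zip p.2).countP (fun q => decide (q.1 ≠ q.2))) := by
    apply List.map_congr_left
    intro p hp
    have hp1 : p.1 ∈ C := List.mem_of_mem_take (List.mem_reverse.mp (List.of_mem_zip hp).1)
    have hp2 : p.2 ∈ C := List.mem_of_mem_drop (List.of_mem_zip hp).2
    simp only [Function.comp_apply, Prod.map]
    exact countP_zip_reverse p.1 p.2 (by rw [hlenC p.1 hp1, hlenC p.2 hp2])
  rw [hsum, ← flat_countP b.length _ _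
    (fun r hr => hlenC r (List.mem_of_mem_take (List.mem_reverse.mp hr)))
    (fun r hr => hlenC r (List.mem_of_mem_drop hr))]
  exact if_congr eq_comm rfl rfl

-- ===== new B-side machinery: last-match fold = descending early-return scan over tables =====

lemma foldl_last_eq_bestGo (dist : List (List Int)) (n : Nat) (smudge : Int) :
    ∀ m, (List.range' 1 m).foldl
        (fun acc i => if (((List.range (min i (n - i))).map
            (fun d => (dist.getD (i - 1 - d) []).getD (i + d) 0)).sum) = smudge
          then (i : Int) else acc) 0 = bestGoB dist n smudge m := by
  intro m
  induction m with
  | zero => simp [bestGoB]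
  | succ m ih =>
    rw [List.range'_concat, List.foldl_append, ih, List.foldl_cons, List.foldl_nil]
    rw [bestGoB]
    have h1 : 1 + 1 * m = m + 1 := by omega
    rw [h1]
    have h2 : m + 1 - 1 = m := by omega
    simp only [h2]

lemma sum_map_natCast {α : Type} (l : List α) (f : α → Nat) :
    (l.map (fun a => ((f a : Nat) : Int))).sum = (((l.map f).sum : Nat) : Int) := by
  induction l with
  | nil => simp
  | cons a l ih => simp [ih]

lemma tbl_getD (f : Nat → Nat → Int) (n j k : Nat) (hj : j < n) (hk : k < n) :
    (((List.range n).map (fun j => (List.range n).map (fun k => f j k))).getD j []).getD k 0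
      = f j k := by
  simp [List.getD, hj, hk]

lemma getD_map_toList (block : List String) (j : Nat) (hj : j < block.length) :
    (block.map String.toList).getD j [] = (block.getD j "").toList := by
  rw [List.getD_eq_getElem _ _ (by simpa using hj), List.getD_eq_getElem _ _ hj,
    List.getElem_map]

lemma zip_take_drop_map (g : List Char × List Char → Nat) (l : List (List Char)) (i : Nat)
    (hi : i ≤ l.length) :
    (((l.take i).reverse.zip (l.drop i)).map g)
      = (List.range (min i (l.length - i))).map
          (fun d => g (l.getD (i - 1 - d) [], l.getD (i + d) [])) := by
  apply List.ext_getElem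
  · simp [Nat.min_eq_left hi]
  · intro d h1 h2
    have hd : d < min i (l.length - i) := by
      simpa [Nat.min_eq_left hi] using h1
    have hb1 : i - 1 - d < l.length := by omega
    have hb2 : i + d < l.length := by omega
    simp only [List.getElem_map, List.getElem_zip, List.getElem_reverse, List.getElem_take,
      List.getElem_drop, List.getElem_range, List.length_take, Nat.min_eq_left hi]
    rw [List.getD_eq_getElem _ _ hb1, List.getD_eq_getElem _ _ hb2]

-- the row scan: A's countA on the rows equals B's table scan (rectangularity aligns streams)
lemma countA_rows (block : List String) (smudge : Int)
    (hok : (∀ r ∈ block, r.toList.length = (block.headD "").toList.length) ∨ block.length ≤ 2) :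
    countA smudge (block.map String.toList)
      = bestGoB (rdB block) block.length smudge (block.length - 1) := by
  rcases hok with hrect | hsmall
  case inr =>
    match block, hsmall with
    | [], _ => rfl
    | [a], _ => rfl
    | [a, b], _ =>
      show countA smudge [a.toList, b.toList] = _
      have hr : List.range' 1 1 = [1] := rfl
      simp only [countA, bestGoB, rdB, distS, List.length_cons, List.length_nil, hr,
        List.foldl_cons, List.foldl_nil, List.take, List.drop, List.reverse_cons,
        List.reverse_nil, List.nil_append, List.flatten_cons, List.flatten_nil,
        List.append_nil, List.range, List.range.loop, List.map_cons, List.map_nil,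
        List.getD, List.sum_cons, List.sum_nil, List.getElem?_cons_zero,
        List.getElem?_cons_succ, Option.getD_some, Nat.min_self, Nat.sub_self]
      by_cases h : smudge = ((a.toList.zip b.toList).countP (fun q => decide (q.1 ≠ q.2)) : Nat)
      · rw [if_pos h, if_pos (by omega)]
      · rw [if_neg h, if_neg (by omega)]
  unfold countA
  rw [List.length_map, ← foldl_last_eq_bestGo (rdB block) block.length smudge (block.length - 1)]
  apply PySem.List.foldl_congr_mem
  intro acc i hi
  obtain ⟨h1, h2⟩ := List.mem_range'_1.mp hi
  have key : (((List.range (min i (block.length - i))).map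
        (fun d => ((rdB block).getD (i - 1 - d) []).getD (i + d) 0)).sum)
      = (((((block.map String.toList).take i).reverse.flatten).zip
            (((block.map String.toList).drop i).flatten)).countP
              (fun q => decide (q.1 ≠ q.2)) : Nat) := by
    have hw : ∀ r ∈ block.map String.toList, r.length = (block.headD "").toList.length := by
      intro r hr
      obtain ⟨s0, hs, rfl⟩ := List.mem_map.mp hr
      exact hrect s0 hs
    rw [flat_countP ((block.headD "").toList.length) _ _
        (fun r hr => hw r (List.mem_of_mem_take (List.mem_reverse.mp hr)))
        (fun r hr => hw r (List.mem_of_mem_drop hr))]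
    rw [zip_take_drop_map (fun p => (p.1.zip p.2).countP (fun q => decide (q.1 ≠ q.2)))
        (block.map String.toList) i (by rw [List.length_map]; omega)]
    simp only [List.length_map]
    rw [← sum_map_natCast]
    apply congrArg List.sum
    apply List.map_congr_left
    intro d hd
    have hdlt := List.mem_range.mp hd
    have hj : i - 1 - d < block.length := by omega
    have hk : i + d < block.length := by omega
    unfold rdB
    rw [tbl_getD _ block.length _ _ hj hk]
    unfold distS
    rw [getD_map_toList block _ hj, getD_map_toList block _ hk]
  exact if_congr (by rw [key]; exact eq_comm) rfl rfl

-- the column scan: B's column table scan equals the split fold over the raw columns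
lemma splitB_cols (block : List String) (smudge : Int) :
    splitB smudge (colsB (block.map String.toList))
      = bestGoB (cdB block) (wB block) smudge (wB block - 1) := by
  have hwB : pvW (block.map String.toList) = wB block := by
    unfold pvW wB
    simp [List.map_map, Function.comp_def]
  have hcl : (colsB (block.map String.toList)).length = wB block := by
    simp [colsB, hwB]
  unfold splitB
  rw [hcl, ← foldl_last_eq_bestGo (cdB block) (wB block) smudge (wB block - 1)]
  apply PySem.List.foldl_congr_mem
  intro acc i hi
  obtain ⟨h1, h2⟩ := List.mem_range'_1.mp hi
  have hgetD : ∀ c, c < wB block → (colsB (block.map String.toList)).getD c []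
      = (block.map String.toList).map (fun row => row.getD c ' ') := by
    intro c hc
    rw [← hwB] at hc
    simp [colsB, List.getD, hc]
  have key : (((List.range (min i (wB block - i))).map
        (fun d => ((cdB block).getD (i - 1 - d) []).getD (i + d) 0)).sum)
      = mismB ((colsB (block.map String.toList)).take i)
          ((colsB (block.map String.toList)).drop i) := by
    unfold mismB
    have hlenC : ∀ r ∈ colsB (block.map String.toList), r.length = block.length := by
      intro r hr
      obtain ⟨c, hc, rfl⟩ := List.mem_map.mp hr
      simp
    rw [flat_countP block.length _ _
        (fun r hr => hlenC r (List.mem_of_mem_take (List.mem_reverse.mp hr)))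
        (fun r hr => hlenC r (List.mem_of_mem_drop hr))]
    rw [zip_take_drop_map (fun p => (p.1.zip p.2).countP (fun q => decide (q.1 ≠ q.2)))
        (colsB (block.map String.toList)) i (by rw [hcl]; omega)]
    rw [hcl, ← sum_map_natCast]
    apply congrArg List.sum
    apply List.map_congr_left
    intro d hd
    have hdlt := List.mem_range.mp hd
    have hj : i - 1 - d < wB block := by omega
    have hk : i + d < wB block := by omega
    unfold cdB
    rw [tbl_getD _ (wB block) _ _ hj hk]
    rw [hgetD _ hj, hgetD _ hk]
    rw [List.zip_map', List.countP_map, List.countP_map]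
    rfl
  exact if_congr (by rw [key]) rfl rfl

lemma block_eq (smudge : Int) (block : List String)
    (hok : (∀ r ∈ block, r.toList.length = (block.headD "").toList.length) ∨ block.length ≤ 2)
    (hm : pvHasMirror (block.map (·.toList)) smudge ∨
      pvHasMirror (pvColumns (block.map (·.toList))) smudge) :
    findMirrorA smudge 3 (block.map String.toList) 100 = scoreB block smudge := by
  have hA1 := countA_rows block smudge hok
  have hA2 : countA smudge (transposeMatA (block.map String.toList))
      = bestGoB (cdB block) (wB block) smudge (wB block - 1) := by
    rw [countA_transpose, splitB_cols]
  rw [findMirrorA]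
  unfold scoreB
  simp only [← hA1, ← hA2]
  by_cases hr : countA smudge (block.map String.toList) = 0
  · simp only [hr]
    rw [if_pos trivial, if_neg (by simp : ¬(0 : Int) ≠ 0)]
    rw [findMirrorA]
    by_cases hc : countA smudge (transposeMatA (block.map String.toList)) = 0
    · exfalso
      rcases hm with h | h
      · exact ((splitB_ne_zero_iff smudge (block.map String.toList)).mpr h)
          (by rw [← countA_eq_splitB]; exact hr)
      · rw [← colsB_eq_pvColumns] at h
        exact ((splitB_ne_zero_iff smudge (colsB (block.map String.toList))).mpr h)
          (by rw [← countA_transpose]; exact hc)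
    · simp only [if_neg hc, if_pos hc]
      exact mul_one _
  · simp only [if_neg hr, if_pos hr]
    exact mul_comm _ _

-- ===== VERDICT (by name: the statement is the Claim_ definition above) =====
theorem solve_spec : Claim_equal_solve := by
  intro blocks smudge _ hpre
  unfold Spec_solve solve solve_alt
  apply PySem.List.foldl_congr_mem
  intro acc block hb
  rw [block_eq smudge block (hpre block hb).1 (hpre block hb).2]
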